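-- pv_equiv track=rewrite | github.com/dropbox/changes | changes/api/source_details.py | _get_files_from_raw_diff
-- ===== SOURCE A (Python) =====
-- def _get_files_from_raw_diff(diff):
--     """
--     Returns a list of filenames from a diff.
--     """
--     files = set()
--     diff_lines = diff.split('\n')
--     for line in diff_lines:
--         if line.startswith('+++ b/'):
--             line = line.split('\t')[0]
--             files.add(line[6:])
--
--     return files
-- ===== SOURCE B (Python) =====
-- def _get_files_from_raw_diff(diff):
--     """
--     Returns a list of filenames from a diff.
--     """
--     # Single manual scan over the raw text: at each line start, if the
--     # '+++ b/' marker is present, capture up to the first tab or line end.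
--     names = []
--     i = 0
--     n = len(diff)
--     while True:
--         if diff.startswith('+++ b/', i):
--             j = i + 6
--             while j < n and diff[j] != '\t' and diff[j] != '\n':
--                 j += 1
--             names.append(diff[i + 6:j])
--         # advance past the end of the current line
--         while i < n and diff[i] != '\n':
--             i += 1
--         if i == n:
--             break
--         i += 1
--     return set(names)
-- ===== Notes on version B (the rewrite author's own statement) =====
-- stated objective: alternative
-- what changed: Replaces the split-into-lines loop with its per-line prefix test, tab split and slicing by a single manual index scan of the raw text that, at each line start, captures the name directly after the marker up to the first tab or line end, collecting names then deduplicating; it trades the fast built-in string methods for one explicit scanner pass.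
import Mathlib
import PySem

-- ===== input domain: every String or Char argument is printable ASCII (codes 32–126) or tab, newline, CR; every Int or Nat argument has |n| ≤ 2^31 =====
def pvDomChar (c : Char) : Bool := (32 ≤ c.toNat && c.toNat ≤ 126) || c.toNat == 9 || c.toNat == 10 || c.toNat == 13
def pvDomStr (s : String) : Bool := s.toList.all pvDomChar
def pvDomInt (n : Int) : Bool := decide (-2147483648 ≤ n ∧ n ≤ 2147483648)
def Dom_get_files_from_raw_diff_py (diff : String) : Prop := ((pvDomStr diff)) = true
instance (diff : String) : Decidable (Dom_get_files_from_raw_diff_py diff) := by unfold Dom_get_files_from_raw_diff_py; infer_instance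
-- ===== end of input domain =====

-- B replaces A's per-line split/startswith/split('\t')/slice pipeline by one manual
-- scan of the raw text that captures each name right after a line-initial '+++ b/'
-- marker (objective: alternative single-pass decomposition, same cost).

-- ===== PORT A =====
-- A: split into lines on '\n'; for each line starting with '+++ b/', cut the line
-- at the first tab, drop the 6 marker characters, and add the name to the set.
def get_files_from_raw_diff_py (diff : String) : List String :=
  let diff_lines := (PySem.Str.split? diff "\n").getD []
  diff_lines.foldl (fun files line =>
    if PySem.Str.startswith line "+++ b/" then
      let line₂ := ((PySem.Str.split? line "\t").getD []).headD ""
      PySem.Set.add files (PySem.Str.slice line₂ (some 6) none)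
    else files) []

-- ===== PORT B =====
-- B's scanner state: the suffix of the text at the current line start. If the
-- marker is present, capture the name (characters after the marker up to the
-- first tab or newline); then advance past the end of the current line.
def pvMarker : List Char := ['+', '+', '+', ' ', 'b', '/']

def pvScanB : List Char → List (List Char)
  | cs =>
    let found :=
      if PySem.Chars.startswith cs pvMarker then
        [(cs.drop 6).takeWhile (fun c => decide (c ≠ '\t' ∧ c ≠ '\n'))]
      else []
    match h : cs.dropWhile (· ≠ '\n') with
    | [] => found
    | _ :: tl => found ++ pvScanB tl
  termination_by cs => cs.length
  decreasing_by
    have h1 : (cs.dropWhile (· ≠ '\n')).length ≤ cs.length := List.length_dropWhile_le _ _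
    rw [h] at h1; simp at h1; omega

def get_files_from_raw_diff_py_alt (diff : String) : List String :=
  PySem.Set.ofList ((pvScanB diff.toList).map String.ofList)

-- ===== PRECONDITION & SPEC =====
def Spec_get_files_from_raw_diff_py (diff : String) (out : List String) : Prop := out = get_files_from_raw_diff_py_alt diff
instance (diff : String) (out : List String) : Decidable (Spec_get_files_from_raw_diff_py diff out) := by unfold Spec_get_files_from_raw_diff_py; infer_instance

-- ===== CLAIM (what is proved, stated in full; the proofs are below) =====
def Claim_equal_get_files_from_raw_diff_py : Prop := ∀ (diff : String), Dom_get_files_from_raw_diff_py diff → Spec_get_files_from_raw_diff_py diff (get_files_from_raw_diff_py diff)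

-- ===== LEMMAS AND PROOFS =====

-- splitting on a single character, as the structural recursion the proofs induct on
def pvSplitChar (c : Char) : List Char → List (List Char)
  | l =>
    l.takeWhile (· ≠ c) ::
      (match h : l.dropWhile (· ≠ c) with
       | [] => []
       | _ :: tl => pvSplitChar c tl)
  termination_by l => l.length
  decreasing_by
    have h1 : (l.dropWhile (· ≠ c)).length ≤ l.length := List.length_dropWhile_le _ _
    rw [h] at h1; simp at h1; omega

theorem pvSplitChar_nil (c : Char) : pvSplitChar c [] = [[]] := by
  rw [pvSplitChar]; simp

theorem pvSplitChar_cons_self (c : Char) (rest : List Char) :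
    pvSplitChar c (c :: rest) = [] :: pvSplitChar c rest := by
  rw [pvSplitChar]
  simp only [List.takeWhile, List.dropWhile]
  congr 1
  · simp
  · split
    · rename_i h; simp at h
    · rename_i h; simp at h; rw [h.2]

theorem pvSplitChar_cons_ne (c a : Char) (rest : List Char) (hac : a ≠ c) :
    pvSplitChar c (a :: rest) = (pvSplitChar c rest).modifyHead (a :: ·) := by
  conv_rhs => rw [pvSplitChar]
  rw [pvSplitChar]
  simp only [List.takeWhile, List.dropWhile]
  simp only [List.modifyHead]
  congr 1
  · simp [hac]
  · split
    · rename_i h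
      rw [show decide (a ≠ c) = true from by simp [hac]] at h; simp only [] at h
      split
      · rfl
      · rename_i h2; rw [h] at h2; simp at h2
    · rename_i h
      rw [show decide (a ≠ c) = true from by simp [hac]] at h; simp only [] at h
      split
      · rename_i h2; rw [h2] at h; simp at h
      · rename_i h2; rw [h2] at h; injection h with _ h3; rw [h3]

theorem pvSplitChar_ne_nil (c : Char) (l : List Char) : pvSplitChar c l ≠ [] := by
  rw [pvSplitChar]; simp

theorem pvSplitOn_go_eq (c : Char) : ∀ (fuel : Nat) (l cur : List Char) (acc : List (List Char)),
    l.length < fuel →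
    PySem.Chars.splitOn.go [c] fuel l cur acc
      = acc.reverse ++ (pvSplitChar c l).modifyHead (cur.reverse ++ ·) := by
  intro fuel
  induction fuel with
  | zero => intro l cur acc h; omega
  | succ n ih =>
    intro l cur acc h
    cases l with
    | nil => rw [pvSplitChar_nil]; simp [PySem.Chars.splitOn.go]
    | cons a rest =>
      rw [PySem.Chars.splitOn.go]
      by_cases hac : a = c
      · subst hac
        rw [if_pos (by simp [List.isPrefixOf])]
        rw [show List.drop [a].length (a :: rest) = rest from by simp]
        rw [ih rest [] (cur.reverse :: acc) (by simp at h ⊢; omega)]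
        rw [pvSplitChar_cons_self]
        obtain ⟨x, xs, hx⟩ := List.exists_cons_of_ne_nil (pvSplitChar_ne_nil a rest)
        rw [hx]
        simp
      · rw [if_neg (by simp [List.isPrefixOf]; exact fun hh => (hac hh.symm).elim)]
        rw [ih rest (a :: cur) acc (by simp at h ⊢; omega)]
        rw [pvSplitChar_cons_ne c a rest hac]
        obtain ⟨x, xs, hx⟩ := List.exists_cons_of_ne_nil (pvSplitChar_ne_nil c rest)
        rw [hx]
        simp

theorem pvSplitOn_eq (c : Char) (l : List Char) :
    PySem.Chars.splitOn l [c] = pvSplitChar c l := by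
  have := pvSplitOn_go_eq c (l.length + 1) l [] [] (by omega)
  rw [PySem.Chars.splitOn, this]
  obtain ⟨x, xs, hx⟩ := List.exists_cons_of_ne_nil (pvSplitChar_ne_nil c l)
  rw [hx]
  simp

-- what B extracts from one line
def pvExtractB (l : List Char) : Option (List Char) :=
  if PySem.Chars.startswith l pvMarker then
    some ((l.drop 6).takeWhile (fun c => decide (c ≠ '\t' ∧ c ≠ '\n')))
  else none

theorem pv_prefix_takeWhile (p : Char → Bool) :
    ∀ (pfx l : List Char), (∀ a ∈ pfx, p a = true) →
    pfx.isPrefixOf (l.takeWhile p) = pfx.isPrefixOf l := by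
  intro pfx
  induction pfx with
  | nil => intro l _; simp [List.isPrefixOf]
  | cons x xs ih =>
    intro l hall
    cases l with
    | nil => simp [List.takeWhile]
    | cons b bs =>
      rw [List.takeWhile]
      by_cases hb : p b = true
      · rw [hb]
        simp only [List.isPrefixOf]
        rw [ih bs (fun a ha => hall a (List.mem_cons_of_mem _ ha))]
      · rw [Bool.eq_false_iff.mpr hb]
        simp only [List.isPrefixOf]
        have hxb : (x == b) = false := by
          by_cases hxbe : x = b
          · exact absurd (hxbe ▸ hall x (List.mem_cons_self)) hb
          · simp [hxbe]
        rw [hxb]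
        simp

theorem pv_marker_all (p : Char → Bool) (h1 : p '+' = true) (h2 : p ' ' = true)
    (h3 : p 'b' = true) (h4 : p '/' = true) : ∀ a ∈ pvMarker, p a = true := by
  intro a ha
  simp [pvMarker] at ha
  rcases ha with rfl | rfl | rfl | rfl | rfl | rfl <;> assumption

theorem pv_starts_take (cs : List Char) :
    PySem.Chars.startswith (cs.takeWhile (· ≠ '\n')) pvMarker
      = PySem.Chars.startswith cs pvMarker := by
  simp only [PySem.Chars.startswith]
  exact pv_prefix_takeWhile _ pvMarker cs (pv_marker_all _ (by decide) (by decide) (by decide) (by decide))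

theorem pv_take_take (l : List Char) :
    (l.takeWhile (· ≠ '\n')).takeWhile (fun c => decide (c ≠ '\t' ∧ c ≠ '\n'))
      = l.takeWhile (fun c => decide (c ≠ '\t' ∧ c ≠ '\n')) := by
  rw [List.takeWhile_takeWhile]
  congr 1
  funext a
  by_cases h1 : a = '\t' <;> by_cases h2 : a = '\n' <;> simp [h1, h2]

theorem pv_name_take (cs : List Char) (hs : PySem.Chars.startswith cs pvMarker = true) :
    ((cs.takeWhile (· ≠ '\n')).drop 6).takeWhile (fun c => decide (c ≠ '\t' ∧ c ≠ '\n'))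
      = (cs.drop 6).takeWhile (fun c => decide (c ≠ '\t' ∧ c ≠ '\n')) := by
  rw [PySem.Chars.startswith_iff] at hs
  obtain ⟨r, hr⟩ := hs
  subst hr
  rw [List.takeWhile_append]
  rw [if_pos (by decide)]
  rw [show (6:Nat) = pvMarker.length from rfl, List.drop_left, List.drop_left]
  exact pv_take_take r

theorem pvScanB_eq_filterMap : ∀ (cs : List Char),
    pvScanB cs = (pvSplitChar '\n' cs).filterMap pvExtractB := by
  intro cs
  induction hn : cs.length using Nat.strong_induction_on generalizing cs with
  | _ n ih =>
  have hhead : pvExtractB (cs.takeWhile (· ≠ '\n'))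
      = if PySem.Chars.startswith cs pvMarker then
          some ((cs.drop 6).takeWhile (fun c => decide (c ≠ '\t' ∧ c ≠ '\n')))
        else none := by
    rw [pvExtractB, pv_starts_take]
    by_cases hs : PySem.Chars.startswith cs pvMarker = true
    · rw [if_pos hs, if_pos hs, pv_name_take cs hs]
    · simp at hs; rw [if_neg (by simp [hs]), if_neg (by simp [hs])]
  rw [pvScanB, pvSplitChar, List.filterMap_cons, hhead]
  rcases hd : cs.dropWhile (· ≠ '\n') with _ | ⟨x, tl⟩
  · by_cases hs : PySem.Chars.startswith cs pvMarker = true <;> simp [hs]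
  · have htl : tl.length < n := by
      have := List.length_dropWhile_le (· ≠ '\n') cs
      rw [hd] at this; simp at this; omega
    by_cases hs : PySem.Chars.startswith cs pvMarker = true <;>
      simp [hs, ih tl.length htl tl rfl]

-- what A extracts from one line (character level)
def pvExtractA (l : List Char) : Option (List Char) :=
  if PySem.Chars.startswith l pvMarker then
    some (((PySem.Chars.splitOn l ['\t']).headD []).drop 6)
  else none

theorem pv_takeWhile_no_nl (r : List Char) (h : ∀ a ∈ r, a ≠ '\n') :
    r.takeWhile (fun c => decide (c ≠ '\t' ∧ c ≠ '\n')) = r.takeWhile (· ≠ '\t') := by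
  induction r with
  | nil => rfl
  | cons a r ih =>
    have ha : a ≠ '\n' := h a (List.mem_cons_self)
    by_cases ht : a = '\t'
    · simp [List.takeWhile, ht]
    · simp only [List.takeWhile]
      rw [show (decide (a ≠ '\t' ∧ a ≠ '\n')) = true from by simp [ht, ha],
          show (decide (a ≠ '\t')) = true from by simp [ht]]
      rw [ih (fun b hb => h b (List.mem_cons_of_mem _ hb))]

theorem pvExtractA_eq_B (l : List Char) (h : ∀ a ∈ l, a ≠ '\n') :
    pvExtractA l = pvExtractB l := by
  rw [pvExtractA, pvExtractB]
  by_cases hs : PySem.Chars.startswith l pvMarker = true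
  · rw [if_pos hs, if_pos hs]
    congr 1
    rw [pvSplitOn_eq]
    obtain ⟨r, hr⟩ := (PySem.Chars.startswith_iff _ _).1 hs
    subst hr
    rw [pvSplitChar]
    simp only [List.headD_cons]
    rw [List.takeWhile_append, if_pos (by decide)]
    rw [show (6:Nat) = pvMarker.length from rfl, List.drop_left, List.drop_left]
    rw [pv_takeWhile_no_nl r (fun a ha => h a (by simp [ha]))]
  · rw [if_neg hs, if_neg hs]

theorem pv_lines_no_nl : ∀ (cs : List Char), ∀ l ∈ pvSplitChar '\n' cs, ∀ a ∈ l, a ≠ '\n' := by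
  intro cs
  induction hn : cs.length using Nat.strong_induction_on generalizing cs with
  | _ n ih =>
  intro l hl a ha
  rw [pvSplitChar] at hl
  rcases List.mem_cons.1 hl with rfl | hl2
  · have := List.mem_takeWhile_imp ha
    simpa using this
  · rcases hd : cs.dropWhile (· ≠ '\n') with _ | ⟨x, tl⟩
    · rw [hd] at hl2; simp at hl2
    · rw [hd] at hl2
      have htl : tl.length < n := by
        have := List.length_dropWhile_le (· ≠ '\n') cs
        rw [hd] at this; simp at this; omega
      exact ih tl.length htl tl rfl l hl2 a ha

theorem pv_foldl_set (L : List String) (p : String → Bool) (f : String → String) :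
    ∀ (s : PySem.Set String),
    L.foldl (fun files line => if p line then PySem.Set.add files (f line) else files) s
      = (L.filterMap (fun line => if p line then some (f line) else none)).foldl PySem.Set.add s := by
  induction L with
  | nil => intro s; rfl
  | cons x L ih =>
    intro s
    rw [List.foldl_cons, List.filterMap_cons]
    by_cases hp : p x = true
    · rw [if_pos hp, if_pos hp, List.foldl_cons, ih]
    · rw [if_neg hp, if_neg hp, ih]

theorem pv_g_eq (line : String) :
    (if PySem.Str.startswith line "+++ b/" then
        some (PySem.Str.slice (((PySem.Str.split? line "\t").getD []).headD "") (some 6) none)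
      else none)
      = Option.map String.ofList (pvExtractA line.toList) := by
  rw [pvExtractA]
  rw [PySem.Str.startswith_eq, show ("+++ b/".toList) = pvMarker from by decide]
  by_cases hs : PySem.Chars.startswith line.toList pvMarker = true
  · rw [if_pos hs, if_pos hs]
    have hmap := PySem.Str.split?_map line "\t"
    rw [show ("\t".toList) = ['\t'] from by decide] at hmap
    rw [show PySem.Chars.split? line.toList ['\t'] = some (PySem.Chars.splitOn line.toList ['\t']) from rfl] at hmap
    cases hsp : PySem.Str.split? line "\t" with
    | none => rw [hsp] at hmap; simp at hmap
    | some M =>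
      rw [hsp] at hmap
      simp only [Option.map_some] at hmap
      have hM := Option.some.inj hmap
      cases M with
      | nil =>
        exfalso
        rw [pvSplitOn_eq] at hM
        exact pvSplitChar_ne_nil '\t' line.toList (by rw [← hM]; rfl)
      | cons m ms =>
        rw [Option.getD_some, List.headD_cons, Option.map_some]
        congr 1
        rw [← hM, List.map_cons, List.headD_cons]
        rw [← String.ofList_toList (s := PySem.Str.slice m (some 6) none)]
        refine congrArg String.ofList ?_
        rw [PySem.Str.toList_slice, PySem.Chars.slice_eq_listSlice]
        simp [pysem]
  · rw [if_neg hs, if_neg hs]; rfl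

theorem pv_main (diff : String) :
    get_files_from_raw_diff_py diff = get_files_from_raw_diff_py_alt diff := by
  rw [get_files_from_raw_diff_py, get_files_from_raw_diff_py_alt]
  have hmap := PySem.Str.split?_map diff "\n"
  rw [show ("\n".toList) = ['\n'] from by decide] at hmap
  rw [show PySem.Chars.split? diff.toList ['\n'] = some (PySem.Chars.splitOn diff.toList ['\n']) from rfl] at hmap
  cases hsp : PySem.Str.split? diff "\n" with
  | none => rw [hsp] at hmap; simp at hmap
  | some L =>
    rw [hsp] at hmap
    simp only [Option.map_some] at hmap
    have hL := Option.some.inj hmap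
    simp only [Option.getD_some]
    rw [pv_foldl_set, ← PySem.Set.ofList_eq_foldl]
    congr 1
    rw [List.filterMap_congr (fun x _ => pv_g_eq x)]
    rw [show (fun line => Option.map String.ofList (pvExtractA line.toList))
          = (fun line => Option.map String.ofList ((pvExtractA ∘ String.toList) line)) from rfl]
    rw [← List.map_filterMap, ← List.filterMap_map, hL, pvSplitOn_eq]
    rw [List.filterMap_congr (fun l hl => pvExtractA_eq_B l (pv_lines_no_nl diff.toList l hl))]
    rw [← pvScanB_eq_filterMap]

-- ===== VERDICT (by name: the statement is the Claim_ definition above) =====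
theorem get_files_from_raw_diff_py_spec : Claim_equal_get_files_from_raw_diff_py := by
  intro diff _
  unfold Spec_get_files_from_raw_diff_py
  exact pv_main diff
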